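-- pv_equiv track=rewrite | github.com/ndemarco/nd-wordlist-tools | src/nd_wordlist_tools/nd_caps.py | _apply_uppercase_mask
-- ===== SOURCE A (Python) =====
-- def _apply_uppercase_mask(word: str, start: int, span_len: int, mask_bits: int) -> str:
--     """
--     Apply a bitmask to uppercase within a contiguous span.
--
--     For i in [0..span_len-1], if the i-th bit of mask_bits is 1, uppercase
--     character at position (start + i). Positions outside the span are unchanged.
--     """
--     if span_len <= 0:
--         return word
--     # Convert to list for efficient per-char mutation
--     chars = list(word)
--     for i in range(span_len):
--         if (mask_bits >> i) & 1:
--             idx = start + i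
--             # Bounds are guaranteed by plan construction, but guard anyway
--             if 0 <= idx < len(chars):
--                 chars[idx] = chars[idx].upper()
--     return "".join(chars)
-- ===== SOURCE B (Python) =====
-- def _apply_uppercase_mask(word: str, start: int, span_len: int, mask_bits: int) -> str:
--     """Single pass over the word: uppercase position j iff j-start is an
--     in-span offset whose mask bit is set."""
--     if span_len <= 0:
--         return word
--     return "".join(
--         c.upper() if 0 <= j - start < span_len and (mask_bits >> (j - start)) & 1 else c
--         for j, c in enumerate(word)
--     )
-- ===== Notes on version B (the rewrite author's own statement) =====
-- stated objective: simpler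
-- what changed: B replaces A's loop over span_len mask bits mutating a char list in place by a single functional pass over the word's characters, testing span membership and the mask bit per position.
import Mathlib
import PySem

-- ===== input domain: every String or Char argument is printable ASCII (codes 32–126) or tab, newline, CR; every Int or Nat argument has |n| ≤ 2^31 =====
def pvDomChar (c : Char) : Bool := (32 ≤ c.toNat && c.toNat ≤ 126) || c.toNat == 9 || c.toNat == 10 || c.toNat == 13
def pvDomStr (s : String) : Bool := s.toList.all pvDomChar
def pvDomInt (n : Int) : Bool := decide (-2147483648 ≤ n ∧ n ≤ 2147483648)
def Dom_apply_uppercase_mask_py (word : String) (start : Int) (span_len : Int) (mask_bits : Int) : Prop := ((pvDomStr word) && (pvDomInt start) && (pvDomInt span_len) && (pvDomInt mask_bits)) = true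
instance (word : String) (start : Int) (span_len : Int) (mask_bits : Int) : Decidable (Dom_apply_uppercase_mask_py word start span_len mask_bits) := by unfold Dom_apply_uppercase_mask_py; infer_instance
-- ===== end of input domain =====

-- B makes one functional pass over the word instead of looping over span_len mask bits with in-place list mutation.

-- ===== PORT A =====
-- A-side helper: the body of A's 'for i in range(span_len)' loop.
def pvAStep (start mask_bits : Int) (cs : List Char) (i : Int) : List Char :=
  if PySem.Int.band (mask_bits >>> i.toNat) 1 ≠ 0 then
    if 0 ≤ start + i ∧ start + i < PySem.List.len cs then
      PySem.List.pySetD cs (start + i) (PySem.Chars.upperChar (PySem.List.pyGetD cs (start + i) ' '))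
    else cs
  else cs

def apply_uppercase_mask_py (word : String) (start : Int) (span_len : Int) (mask_bits : Int) : String :=
  if span_len ≤ 0 then word
  else
    String.ofList ((PySem.List.pyRange 0 span_len 1).foldl (pvAStep start mask_bits) word.toList)

-- ===== PORT B =====
-- B-side helper: the generator expression of Source B over enumerate(word).
def pvBMap (start span_len mask_bits : Int) (cs : List Char) : List Char :=
  (PySem.List.enumerate cs 0).map (fun p =>
    if 0 ≤ p.1 - start ∧ p.1 - start < span_len ∧ PySem.Int.band (mask_bits >>> (p.1 - start).toNat) 1 ≠ 0
    then PySem.Chars.upperChar p.2 else p.2)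

def apply_uppercase_mask_py_alt (word : String) (start : Int) (span_len : Int) (mask_bits : Int) : String :=
  if span_len ≤ 0 then word
  else String.ofList (pvBMap start span_len mask_bits word.toList)

-- ===== PRECONDITION & SPEC =====
def Spec_apply_uppercase_mask_py (word : String) (start : Int) (span_len : Int) (mask_bits : Int) (out : String) : Prop := out = apply_uppercase_mask_py_alt word start span_len mask_bits
instance (word : String) (start : Int) (span_len : Int) (mask_bits : Int) (out : String) : Decidable (Spec_apply_uppercase_mask_py word start span_len mask_bits out) := by unfold Spec_apply_uppercase_mask_py; infer_instance

-- ===== CLAIM (what is proved, stated in full; the proofs are below) =====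
def Claim_equal_apply_uppercase_mask_py : Prop := ∀ (word : String) (start : Int) (span_len : Int) (mask_bits : Int), Dom_apply_uppercase_mask_py word start span_len mask_bits → Spec_apply_uppercase_mask_py word start span_len mask_bits (apply_uppercase_mask_py word start span_len mask_bits)

-- ===== LEMMAS AND PROOFS =====

theorem pvBMap_length (start span_len mask_bits : Int) (cs : List Char) :
    (pvBMap start span_len mask_bits cs).length = cs.length := by
  simp [pvBMap, PySem.List.length_enumerate]

theorem pvBMap_getElem (start span_len mask_bits : Int) (cs : List Char) (k : Nat)
    (hk : k < cs.length) :
    (pvBMap start span_len mask_bits cs)[k]'(by simpa [pvBMap_length] using hk)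
      = (if 0 ≤ (k : Int) - start ∧ (k : Int) - start < span_len ∧
            PySem.Int.band (mask_bits >>> ((k : Int) - start).toNat) 1 ≠ 0
         then PySem.Chars.upperChar cs[k] else cs[k]) := by
  simp [pvBMap, PySem.List.getElem_enumerate]

theorem pvFold_eq (start mask_bits : Int) (n : Nat) (cs : List Char) :
    (PySem.List.pyRange 0 (n : Int) 1).foldl (pvAStep start mask_bits) cs
      = pvBMap start (n : Int) mask_bits cs := by
  induction n with
  | zero =>
      rw [PySem.List.pyRange_one_eq_nil (by norm_num)]
      simp only [List.foldl_nil, pvBMap]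
      have : ∀ p : Int × Char,
          (if 0 ≤ p.1 - start ∧ p.1 - start < (0 : Int) ∧
              PySem.Int.band (mask_bits >>> (p.1 - start).toNat) 1 ≠ 0
           then PySem.Chars.upperChar p.2 else p.2) = p.2 := by
        intro p; rw [if_neg]; rintro ⟨h1, h2, _⟩; omega
      simp only [Nat.cast_zero]
      rw [List.map_congr_left (fun p _ => this p)]
      simp [PySem.List.map_snd_enumerate]
  | succ n ih =>
      have hsplit : PySem.List.pyRange 0 ((n + 1 : Nat) : Int) 1
          = PySem.List.pyRange 0 (n : Int) 1 ++ [(n : Int)] := by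
        have := PySem.List.pyRange_one_succ_right (a := 0) (b := (n : Int)) (by positivity)
        push_cast
        simpa using this
      rw [hsplit, List.foldl_append, ih]
      simp only [List.foldl_cons, List.foldl_nil]
      by_cases hbit : PySem.Int.band (mask_bits >>> ((n : Int)).toNat) 1 ≠ 0
      · by_cases hin : 0 ≤ start + (n : Int) ∧ start + (n : Int) < PySem.List.len (pvBMap start (n : Int) mask_bits cs)
        · -- in-range set: compare pointwise
          rw [pvAStep, if_pos hbit, if_pos hin]
          have hlen : (pvBMap start (n : Int) mask_bits cs).length = cs.length := pvBMap_length ..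
          have hinN : (start + (n : Int)).toNat < cs.length := by
            simp [PySem.List.len] at hin; omega
          rw [PySem.List.pySetD_of_nonneg _ _ hin.1]
          apply List.ext_getElem
          · simp [hlen, pvBMap_length]
          · intro k hk1 hk2
            have hkcs : k < cs.length := by simpa [hlen] using hk1
            rw [pvBMap_getElem start ((n + 1 : Nat) : Int) mask_bits cs k hkcs]
            rw [List.getElem_set]
            by_cases hkeq : (start + (n : Int)).toNat = k
            · -- the freshly-set position: its old pvBMap value is the original char
              subst hkeq
              have hgd : PySem.List.pyGetD (pvBMap start (n : Int) mask_bits cs) (start + (n : Int)) ' '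
                  = cs[(start + (n : Int)).toNat]'hinN := by
                rw [PySem.List.pyGetD_of_nonneg _ _ hin.1]
                simp only [List.getD_eq_getElem?_getD]
                rw [List.getElem?_eq_getElem (by simpa [hlen] using hinN)]
                rw [pvBMap_getElem _ _ _ _ _ hinN]
                rw [if_neg]
                · rfl
                · rintro ⟨h1, h2, _⟩; omega
              rw [if_pos rfl, hgd, if_pos]
              have hexp : ((((start + (n : Int)).toNat : Int)) - start).toNat = (n : Int).toNat := by omega
              rw [hexp]
              refine ⟨by omega, by push_cast; omega, by simpa using hbit⟩
            · rw [if_neg hkeq, pvBMap_getElem _ _ _ _ _ hkcs]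
              have hne : (k : Int) - start ≠ (n : Int) := by omega
              by_cases hc : 0 ≤ (k : Int) - start ∧ (k : Int) - start < (n : Int) ∧
                  PySem.Int.band (mask_bits >>> ((k : Int) - start).toNat) 1 ≠ 0
              · rw [if_pos hc, if_pos ⟨hc.1, by push_cast; omega, hc.2.2⟩]
              · rw [if_neg hc, if_neg]
                rintro ⟨h1, h2, h3⟩
                refine hc ⟨h1, ?_, h3⟩
                have : (k : Int) - start ≠ (n : Int) := by omega
                push_cast at h2
                omega
        · -- out-of-range target: both sides leave everything unchanged
          rw [pvAStep, if_pos hbit, if_neg hin]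
          unfold pvBMap
          apply List.map_congr_left
          intro p hp
          obtain ⟨k, hklt, rfl⟩ := (PySem.List.mem_enumerate_iff _ _ _).1 hp
          have hlen : (pvBMap start (n : Int) mask_bits cs).length = cs.length := pvBMap_length ..
          simp only [PySem.List.len, hlen] at hin
          by_cases hc : 0 ≤ (0 : Int) + (k : Int) - start ∧ (0 : Int) + (k : Int) - start < (n : Int) ∧
              PySem.Int.band (mask_bits >>> (((0 : Int) + (k : Int)) - start).toNat) 1 ≠ 0
          · rw [if_pos hc, if_pos ⟨hc.1, by omega, hc.2.2⟩]
          · rw [if_neg hc, if_neg]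
            rintro ⟨h1, h2, h3⟩
            refine hc ⟨h1, ?_, h3⟩
            -- p.1 - start < n: the only new offset n would need index start+n, which is out of range
            have : (0 : Int) + (k : Int) - start ≠ (n : Int) := by omega
            omega
      · -- bit n clear: step is the identity, and the new offset never fires
        rw [pvAStep, if_neg hbit]
        unfold pvBMap
        apply List.map_congr_left
        intro p hp
        obtain ⟨k, hklt, rfl⟩ := (PySem.List.mem_enumerate_iff _ _ _).1 hp
        by_cases hc : 0 ≤ (0 : Int) + (k : Int) - start ∧ (0 : Int) + (k : Int) - start < (n : Int) ∧
            PySem.Int.band (mask_bits >>> (((0 : Int) + (k : Int)) - start).toNat) 1 ≠ 0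
        · rw [if_pos hc, if_pos ⟨hc.1, by omega, hc.2.2⟩]
        · rw [if_neg hc, if_neg]
          rintro ⟨h1, h2, h3⟩
          refine hc ⟨h1, ?_, h3⟩
          by_contra hge
          have heq : ((0 : Int) + (k : Int) - start) = (n : Int) := by omega
          rw [heq] at h3
          exact hbit (by simpa using h3)

-- ===== VERDICT (by name: the statement is the Claim_ definition above) =====
theorem apply_uppercase_mask_py_spec : Claim_equal_apply_uppercase_mask_py := by
  intro word start span_len mask_bits _
  unfold Spec_apply_uppercase_mask_py apply_uppercase_mask_py apply_uppercase_mask_py_alt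
  by_cases h : span_len ≤ 0
  · rw [if_pos h, if_pos h]
  · rw [if_neg h, if_neg h]
    have hcast : span_len = ((span_len.toNat : Nat) : Int) := by omega
    rw [hcast, pvFold_eq]
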